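-- pv_equiv track=rewrite | github.com/gsethupathy5/AI_For_CS | python/2437.number-of-valid-clock-times/solution.py | countTime
-- ===== SOURCE A (Python) =====
-- def countTime(time: str) -> int:
--     count = 0
--
--     for h in range(24):
--         for m in range(60):
--             if (time[0] == '?' or int(time[0]) == h // 10) and \
--                (time[1] == '?' or int(time[1]) == h % 10) and \
--                (time[3] == '?' or int(time[3]) == m // 10) and \
--                (time[4] == '?' or int(time[4]) == m % 10):
--                 count += 1
--
--     return count
-- ===== SOURCE B (Python) =====
-- def countTime(time: str) -> int:
--     hours = 0
--     for h in range(24):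
--         if (time[0] == '?' or int(time[0]) == h // 10) and \
--            (time[1] == '?' or int(time[1]) == h % 10):
--             hours += 1
--     if hours == 0:
--         return 0
--     minutes = 0
--     for m in range(60):
--         if (time[3] == '?' or int(time[3]) == m // 10) and \
--            (time[4] == '?' or int(time[4]) == m % 10):
--             minutes += 1
--     return hours * minutes
-- ===== Notes on version B (the rewrite author's own statement) =====
-- stated objective: alternative
-- what changed: Replaces the single nested 24x60 scan with two independent passes (count matching hours over range(24), count matching minutes over range(60)) combined multiplicatively, with an early return 0 when no hour matches.
import Mathlib
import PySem

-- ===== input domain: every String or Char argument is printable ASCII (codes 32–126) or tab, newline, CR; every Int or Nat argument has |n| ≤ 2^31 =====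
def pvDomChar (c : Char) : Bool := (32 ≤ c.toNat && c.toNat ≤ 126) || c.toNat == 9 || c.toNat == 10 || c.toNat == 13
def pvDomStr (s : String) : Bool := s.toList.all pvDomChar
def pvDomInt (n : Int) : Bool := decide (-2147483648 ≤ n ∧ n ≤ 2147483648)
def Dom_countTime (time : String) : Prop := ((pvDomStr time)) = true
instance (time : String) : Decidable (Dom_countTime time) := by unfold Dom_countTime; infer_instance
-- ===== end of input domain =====

-- B counts matching hours and matching minutes in two separate passes and multiplies them
-- (returning 0 early when no hour matches), instead of A's single nested 24×60 scan;
-- an alternative decomposition of the same exact computation.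

-- ===== PORT A =====
-- int(time[i]) raises ValueError on a non-digit char; exact for single ASCII chars
def pvDigit? (o : Option Char) : Option Int :=
  match o with
  | some c => if c.isDigit then some ((c.toNat : Int) - 48) else none
  | none => none

-- the clause "time[i] == '?' or int(time[i]) == v" (junk/out-of-range gives false, which
-- only matters inside an already-false conjunction on Pre_ inputs, mirroring short-circuit)
def pvMatch (time : String) (i : Int) (v : Int) : Bool :=
  PySem.Str.pyGet? time i == some '?' || pvDigit? (PySem.Str.pyGet? time i) == some v

def countTime (time : String) : Int :=
  (PySem.List.pyRange 0 24 1).foldl (fun count h =>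
    (PySem.List.pyRange 0 60 1).foldl (fun count m =>
      if pvMatch time 0 (PySem.Int.floordiv h 10) && pvMatch time 1 (PySem.Int.mod h 10) &&
         pvMatch time 3 (PySem.Int.floordiv m 10) && pvMatch time 4 (PySem.Int.mod m 10)
      then count + 1 else count) count) 0

-- ===== PORT B =====
def countTime_alt (time : String) : Int :=
  let hours := (PySem.List.pyRange 0 24 1).foldl (fun c h =>
    if pvMatch time 0 (PySem.Int.floordiv h 10) && pvMatch time 1 (PySem.Int.mod h 10)
    then c + 1 else c) 0
  if hours == 0 then 0
  else
    let minutes := (PySem.List.pyRange 0 60 1).foldl (fun c m =>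
      if pvMatch time 3 (PySem.Int.floordiv m 10) && pvMatch time 4 (PySem.Int.mod m 10)
      then c + 1 else c) 0
    hours * minutes

-- ===== PRECONDITION & SPEC =====
-- position i is '?' or a digit (and in range) — otherwise int(time[i]) / time[i] raises
def pvOK (o : Option Char) : Bool := o == some '?' || o.any Char.isDigit
def pvLE (o : Option Char) (c : Char) : Bool := o.any (· ≤ c)
-- pvE0: some hour matches position 0; pvE01: some hour matches positions 0 and 1
-- (then position 3 is evaluated); pvE3: some minute matches position 3 (then position 4 is).
def pvE0 (time : String) : Bool :=
  PySem.Str.pyGet? time 0 == some '?' || pvLE (PySem.Str.pyGet? time 0) '2'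
def pvE01 (time : String) : Bool :=
  pvE0 time && (PySem.Str.pyGet? time 1 == some '?' || PySem.Str.pyGet? time 0 == some '?' ||
    pvLE (PySem.Str.pyGet? time 0) '1' || pvLE (PySem.Str.pyGet? time 1) '3')
def pvE3 (time : String) : Bool :=
  PySem.Str.pyGet? time 3 == some '?' || pvLE (PySem.Str.pyGet? time 3) '5'
-- Pre_ = exactly the inputs where A returns: short-circuiting means a later position is
-- only required to be '?'/digit when an earlier position can still be matched.
def Pre_countTime (time : String) : Prop :=
  pvOK (PySem.Str.pyGet? time 0) = true ∧
  (pvE0 time = true → pvOK (PySem.Str.pyGet? time 1) = true) ∧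
  (pvE01 time = true → pvOK (PySem.Str.pyGet? time 3) = true) ∧
  ((pvE01 time && pvE3 time) = true → pvOK (PySem.Str.pyGet? time 4) = true)
instance (time : String) : Decidable (Pre_countTime time) := by unfold Pre_countTime; infer_instance
def pvWitness_countTime : String := "1?:3?"

def Spec_countTime (time : String) (out : Int) : Prop := out = countTime_alt time
instance (time : String) (out : Int) : Decidable (Spec_countTime time out) := by unfold Spec_countTime; infer_instance

-- ===== CLAIM (what is proved, stated in full; the proofs are below) =====
def Claim_equal_countTime : Prop := ∀ (time : String), Dom_countTime time → Pre_countTime time → Spec_countTime time (countTime time)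

-- ===== LEMMAS AND PROOFS =====

lemma pvFoldl_id (M : List Int) (acc : Int) : M.foldl (fun b (_ : Int) => b) acc = acc := by
  induction M generalizing acc with
  | nil => rfl
  | cons x M ih => simpa using ih acc

lemma pvCntShift (r : Int → Bool) (M : List Int) : ∀ (acc : Int),
    M.foldl (fun b m => if r m then b + 1 else b) acc
      = acc + M.foldl (fun b m => if r m then b + 1 else b) 0 := by
  induction M with
  | nil => intro acc; simp
  | cons x M ih =>
      intro acc
      simp only [List.foldl_cons]
      rw [ih, ih (if r x then 0 + 1 else 0)]
      split_ifs <;> omega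

lemma pvInner (q : Int → Bool) (pb : Bool) (M : List Int) (acc : Int) :
    M.foldl (fun b m => if pb && q m then b + 1 else b) acc
      = acc + (if pb then M.foldl (fun b m => if q m then b + 1 else b) 0 else 0) := by
  cases pb with
  | false => simp [pvFoldl_id]
  | true => simp only [Bool.true_and, if_true]; exact pvCntShift q M acc

lemma pvOuter (p q : Int → Bool) (M : List Int) : ∀ (L : List Int) (acc : Int),
    L.foldl (fun a h => M.foldl (fun b m => if p h && q m then b + 1 else b) a) acc
      = acc + (L.foldl (fun a h => if p h then a + 1 else a) 0)
              * (M.foldl (fun b m => if q m then b + 1 else b) 0) := by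
  intro L
  induction L with
  | nil => intro acc; simp
  | cons x L ih =>
      intro acc
      simp only [List.foldl_cons]
      rw [ih, pvInner, pvCntShift p L (if p x then 0 + 1 else 0)]
      split_ifs <;> ring

lemma pvRegroup (a b c d : Bool) : (a && b && c && d) = ((a && b) && (c && d)) := by
  cases a <;> cases b <;> cases c <;> cases d <;> rfl

lemma pvA_eq_mul (time : String) :
    countTime time =
      ((PySem.List.pyRange 0 24 1).foldl (fun c h =>
        if pvMatch time 0 (PySem.Int.floordiv h 10) && pvMatch time 1 (PySem.Int.mod h 10)
        then c + 1 else c) 0)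
      * ((PySem.List.pyRange 0 60 1).foldl (fun c m =>
        if pvMatch time 3 (PySem.Int.floordiv m 10) && pvMatch time 4 (PySem.Int.mod m 10)
        then c + 1 else c) 0) := by
  unfold countTime
  have h := pvOuter
    (fun h => pvMatch time 0 (PySem.Int.floordiv h 10) && pvMatch time 1 (PySem.Int.mod h 10))
    (fun m => pvMatch time 3 (PySem.Int.floordiv m 10) && pvMatch time 4 (PySem.Int.mod m 10))
    (PySem.List.pyRange 0 60 1) (PySem.List.pyRange 0 24 1) 0
  simp only [pvRegroup] at *
  omega

lemma pvIfMul (H M : Int) : (if H == 0 then 0 else H * M) = H * M := by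
  by_cases h : H = 0 <;> simp [h]

-- ===== VERDICT (by name: the statement is the Claim_ definition above) =====
theorem countTime_spec : Claim_equal_countTime := by
  intro time _ _
  unfold Spec_countTime
  rw [pvA_eq_mul]
  exact (pvIfMul _ _).symm
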